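-- pv_equiv track=rewrite | github.com/AudiusProject/audius-protocol | discovery-provider/alembic/versions/c8d2be7dcccc_repair_poorly_sorted_tracks.py | unfix_segments
-- ===== SOURCE A (Python) =====
-- FMT = "segment%03d.ts"
--
-- def unfix_segments(segments):
--     """
--     Un-fixes segments (for down migration).
--     Identical to fix_segments, except proper_index and i are swapped to revert the change.
--     """
--     unfixed_segments = [None] * len(segments)
--     tuples = [(i, FMT % i) for i in range(0, len(segments))]
--     sorted_tuples = sorted(tuples, key=lambda x: x[1])
--     segment_map = {}
--     for i in range(len(sorted_tuples)):
--         proper_index = sorted_tuples[i][0]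
--         # This line is the only difference from fix_segments.
--         segment_map[proper_index] = i
--
--     for mapping in segment_map.items():
--         unfixed_segments[mapping[1]] = segments[mapping[0]]
--     return unfixed_segments
-- ===== SOURCE B (Python) =====
-- FMT = "segment%03d.ts"
--
-- def unfix_segments(segments):
--     # Counting-rank placement: no sorting pass at all. Each index i goes to
--     # position #{j : FMT % j < FMT % i} (keys are pairwise distinct), which is
--     # exactly its position in the sorted order A computes.
--     keys = [FMT % i for i in range(len(segments))]
--     unfixed = [None] * len(segments)
--     for i, k in enumerate(keys):
--         unfixed[sum(x < k for x in keys)] = segments[i]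
--     return unfixed
-- ===== Notes on version B (the rewrite author's own statement) =====
-- stated objective: alternative
-- what changed: B eliminates the sort entirely: it places each segment directly at its comparison-count rank (the number of name strings lexicographically smaller than its own), instead of A's decorate-with-tuples / sort / index-dict / scatter pipeline.
import Mathlib
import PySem

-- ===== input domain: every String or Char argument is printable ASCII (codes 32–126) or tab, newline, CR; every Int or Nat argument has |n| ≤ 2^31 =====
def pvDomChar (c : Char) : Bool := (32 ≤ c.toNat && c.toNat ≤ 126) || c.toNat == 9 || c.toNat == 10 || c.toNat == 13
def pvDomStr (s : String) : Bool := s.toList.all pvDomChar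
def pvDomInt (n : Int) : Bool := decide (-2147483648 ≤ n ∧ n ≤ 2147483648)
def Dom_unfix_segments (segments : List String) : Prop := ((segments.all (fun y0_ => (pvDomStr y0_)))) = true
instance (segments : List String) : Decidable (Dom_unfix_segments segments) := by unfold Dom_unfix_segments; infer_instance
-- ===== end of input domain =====

-- B drops the sort altogether: each segment is placed directly at its comparison-count rank
-- (the number of name strings smaller than its own); objective: alternative algorithm, not faster.

-- FMT % i  =  "segment%03d.ts" % i  (only ever called with i ≥ 0 here: zero-pad str(i) to width 3)
def pyFmt (i : Int) : String :=
  let ds := PySem.Int.toChars i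
  String.ofList ("segment".toList ++ List.replicate (3 - ds.length) '0' ++ ds ++ ".ts".toList)

-- ===== PORT A =====
def unfix_segments (segments : List String) : List String :=
  -- [None] * len(segments) modelled as List (Option String); every slot is assigned below, so the final getD "" is exact
  let unfixed0 : List (Option String) := List.replicate segments.length (none : Option String)
  let tuples := (PySem.List.pyRange 0 (PySem.List.len segments) 1).map (fun i => (i, pyFmt i))
  let sorted_tuples := PySem.List.sorted tuples (fun x => x.2) false
  let segment_map : PySem.Dict Int Int :=
    (PySem.List.pyRange 0 (PySem.List.len sorted_tuples) 1).foldl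
      (fun d i => d.insert (PySem.List.pyGetD sorted_tuples i (0, "")).1 i) PySem.Dict.empty
  let unfixed := segment_map.items.foldl
      (fun acc m => PySem.List.pySetD acc m.2 (some (PySem.List.pyGetD segments m.1 ""))) unfixed0
  unfixed.map (fun o => o.getD "")

-- ===== PORT B =====
def unfix_segments_alt (segments : List String) : List String :=
  let keys := (PySem.List.pyRange 0 (PySem.List.len segments) 1).map pyFmt
  let unfixed0 : List (Option String) := List.replicate segments.length (none : Option String)
  let unfixed := (PySem.List.enumerate keys 0).foldl
      (fun acc p => PySem.List.pySetD acc ((keys.countP (fun x => decide (x < p.2)) : Nat) : Int)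
        (some (PySem.List.pyGetD segments p.1 ""))) unfixed0
  unfixed.map (fun o => o.getD "")

-- ===== PRECONDITION & SPEC =====
def Spec_unfix_segments (segments : List String) (out : List String) : Prop := out = unfix_segments_alt segments
instance (segments : List String) (out : List String) : Decidable (Spec_unfix_segments segments out) := by unfold Spec_unfix_segments; infer_instance

-- ===== CLAIM (what is proved, stated in full; the proofs are below) =====
def Claim_equal_unfix_segments : Prop := ∀ (segments : List String), Dom_unfix_segments segments → Spec_unfix_segments segments (unfix_segments segments)

-- ===== LEMMAS AND PROOFS =====

-- the sorted index permutation and the gathered list both programs realise, named for the proofs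
def pvOrder (segments : List String) : List Int :=
  PySem.List.sorted (PySem.List.pyRange 0 (PySem.List.len segments) 1) (fun i => pyFmt i) false

def pvGather (segments : List String) : List String :=
  (pvOrder segments).map (fun k => PySem.List.pyGetD segments k "")

-- ---------- A-side: A computes pvGather ----------

-- inserting a decorated element into a decorated list is decorating the insertion
theorem insertBy_map_comm {α β : Type} (g : α → β) (cmpa : α → α → Bool) (cmpb : β → β → Bool)
    (h : ∀ a b, cmpb (g a) (g b) = cmpa a b) (x : α) :
    ∀ ys : List α, PySem.List.insertBy cmpb (g x) (ys.map g) = (PySem.List.insertBy cmpa x ys).map g := by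
  intro ys
  induction ys with
  | nil => simp [PySem.List.insertBy]
  | cons y ys ih =>
      simp only [List.map_cons, PySem.List.insertBy, h x y]
      by_cases hc : cmpa x y = true
      · simp [hc]
      · simp [hc, ih]

-- insertion sort of a decorated list is the decorated insertion sort
theorem foldl_insertBy_map {α β : Type} (g : α → β) (cmpa : α → α → Bool) (cmpb : β → β → Bool)
    (h : ∀ a b, cmpb (g a) (g b) = cmpa a b) :
    ∀ (xs acc : List α),
      (xs.map g).foldl (fun a x => PySem.List.insertBy cmpb x a) (acc.map g)
        = (xs.foldl (fun a x => PySem.List.insertBy cmpa x a) acc).map g := by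
  intro xs
  induction xs with
  | nil => intro acc; simp
  | cons x xs ih =>
      intro acc
      simp only [List.map_cons, List.foldl_cons]
      rw [insertBy_map_comm g cmpa cmpb h x acc]
      exact ih _

-- A sorts the decorated tuples by their second component: that is the index sort, decorated
theorem sorted_tuples_eq (segments : List String) :
    PySem.List.sorted ((PySem.List.pyRange 0 (PySem.List.len segments) 1).map (fun i => (i, pyFmt i)))
        (fun x => x.2) false
      = (pvOrder segments).map (fun i => (i, pyFmt i)) := by
  unfold pvOrder
  rw [PySem.List.sorted_eq_foldl_insertBy, PySem.List.sorted_eq_foldl_insertBy]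
  simpa using foldl_insertBy_map (fun i => (i, pyFmt i))
    (fun a b => decide (pyFmt a < pyFmt b)) (fun a b => decide (a.2 < b.2))
    (fun _ _ => rfl) (PySem.List.pyRange 0 (PySem.List.len segments) 1) []

theorem pvOrder_length (segments : List String) : (pvOrder segments).length = segments.length := by
  unfold pvOrder
  rw [PySem.List.length_sorted, PySem.List.length_pyRange_one]
  simp [PySem.List.len]

theorem pvOrder_nodup (segments : List String) : (pvOrder segments).Nodup :=
  ((PySem.List.sorted_perm _ _ _).nodup_iff).mpr (PySem.List.nodup_pyRange_one _ _)

-- enumerate commutes with map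
theorem enumerate_map {α β : Type} (g : α → β) :
    ∀ (xs : List α) (s : Int),
      PySem.List.enumerate (xs.map g) s = (PySem.List.enumerate xs s).map (fun p => (p.1, g p.2)) := by
  intro xs
  induction xs with
  | nil => intro s; simp [PySem.List.enumerate_nil]
  | cons x xs ih => intro s; simp [PySem.List.enumerate_cons, ih]

-- A's scatter loop over (position, key) pairs with consecutive positions fills the tail of init
theorem scatter_fill (f : Int → Option String) :
    ∀ (ord : List Int) (s : Nat) (init : List (Option String)), init.length = s + ord.length →
      (PySem.List.enumerate ord (s : Int)).foldl
          (fun acc p => PySem.List.pySetD acc p.1 (f p.2)) init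
        = init.take s ++ ord.map f := by
  intro ord
  induction ord with
  | nil =>
      intro s init h
      simp only [List.length_nil] at h
      simp [PySem.List.enumerate_nil, List.take_of_length_le (by omega : init.length ≤ s)]
  | cons k ord ih =>
      intro s init h
      rw [PySem.List.enumerate_cons, List.foldl_cons]
      have hs : s < init.length := by simp at h; omega
      have hcast : ((s : Int) + 1) = ((s + 1 : Nat) : Int) := by push_cast; ring
      rw [hcast, PySem.List.pySetD_natCast,
          ih (s + 1) (init.set s (f k)) (by simp at h ⊢; omega)]
      have htake : (init.set s (f k)).take (s + 1) = init.take s ++ [f k] := by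
        rw [List.take_add_one, List.take_set_of_le (le_refl s)]
        simp [hs]
      simp [htake]

theorem unfix_eq_gather (segments : List String) :
    unfix_segments segments = pvGather segments := by
  simp only [unfix_segments]
  rw [sorted_tuples_eq segments]
  -- the index loop builds the dict from enumerate of the sorted tuples
  have hfold :
      (PySem.List.pyRange 0 (PySem.List.len ((pvOrder segments).map (fun i => (i, pyFmt i)))) 1).foldl
        (fun d i => d.insert (PySem.List.pyGetD ((pvOrder segments).map (fun i => (i, pyFmt i))) i (0, "")).1 i)
        (PySem.Dict.empty : PySem.Dict Int Int)
      = (PySem.List.enumerate ((pvOrder segments).map (fun i => (i, pyFmt i))) 0).foldl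
          (fun d p => d.insert p.2.1 p.1) (PySem.Dict.empty : PySem.Dict Int Int) := by
    rw [PySem.List.enumerate_eq_map_pyRange ((pvOrder segments).map (fun i => (i, pyFmt i))) (0, ""),
        List.foldl_map]
  rw [hfold]
  -- keys inserted, in loop order, are exactly pvOrder segments: all distinct, so items is the pair list
  have hmapkeys :
      (PySem.List.enumerate ((pvOrder segments).map (fun i => (i, pyFmt i))) 0).map (fun p => p.2.1)
        = pvOrder segments := by
    rw [enumerate_map (fun i => (i, pyFmt i)) (pvOrder segments) 0, List.map_map]
    have h2 : ((fun p : Int × (Int × String) => p.2.1) ∘ fun p : Int × Int => (p.1, (p.2, pyFmt p.2)))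
        = fun p : Int × Int => p.2 := by funext p; simp
    rw [h2, PySem.List.map_snd_enumerate]
  have hitems :
      ((PySem.List.enumerate ((pvOrder segments).map (fun i => (i, pyFmt i))) 0).foldl
          (fun d p => d.insert p.2.1 p.1) (PySem.Dict.empty : PySem.Dict Int Int)).items
      = (PySem.List.enumerate ((pvOrder segments).map (fun i => (i, pyFmt i))) 0).map
          (fun p => (p.2.1, p.1)) := by
    rw [PySem.Dict.items_foldl_insert_fresh
        (PySem.List.enumerate ((pvOrder segments).map (fun i => (i, pyFmt i))) 0)
        (fun p => p.2.1) (fun p => p.1) (PySem.Dict.empty : PySem.Dict Int Int)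
        (fun a _ => PySem.Dict.contains_empty _)
        (by rw [hmapkeys]; exact pvOrder_nodup segments)]
    simp [show (PySem.Dict.empty : PySem.Dict Int Int).items = [] from rfl]
  rw [hitems]
  -- the scatter loop gathers segments along pvOrder
  rw [List.foldl_map, enumerate_map (fun i => (i, pyFmt i)) (pvOrder segments) 0, List.foldl_map]
  have hfinal :
      (PySem.List.enumerate (pvOrder segments) 0).foldl
          (fun acc p => PySem.List.pySetD acc p.1 (some (PySem.List.pyGetD segments p.2 "")))
          (List.replicate segments.length (none : Option String))
        = (pvOrder segments).map (fun k => some (PySem.List.pyGetD segments k "")) := by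
    have := scatter_fill (fun k => some (PySem.List.pyGetD segments k ""))
        (pvOrder segments) 0 (List.replicate segments.length (none : Option String))
        (by simp [pvOrder_length])
    simpa using this
  calc _ = ((pvOrder segments).map (fun k => some (PySem.List.pyGetD segments k ""))).map
            (fun o => o.getD "") := by rw [← hfinal]
    _ = pvGather segments := by
          rw [List.map_map]; rfl

-- ---------- pyFmt is injective on the nonnegative integers ----------

theorem digitChar_inj (m n : Nat) (hm : m < 10) (hn : n < 10)
    (h : Nat.digitChar m = Nat.digitChar n) : m = n := by
  interval_cases m <;> interval_cases n <;> first | rfl | (exact absurd h (by decide))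

theorem toDigits_ne_zero_cons (n : Nat) (hn : 0 < n) : ∀ l, Nat.toDigits 10 n ≠ '0' :: l := by
  induction n using Nat.strong_induction_on with
  | _ n ih =>
    intro l h
    rw [Nat.toDigits_eq_if (by norm_num)] at h
    by_cases hlt : n < 10
    · simp only [if_pos hlt] at h
      have hd : Nat.digitChar n = '0' := by injection h
      interval_cases n <;> exact absurd hd (by decide)
    · simp only [if_neg hlt] at h
      cases hq : Nat.toDigits 10 (n / 10) with
      | nil => exact absurd hq (by have := @Nat.length_toDigits_pos 10 (n / 10); intro he; simp [he] at this)
      | cons c t =>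
          rw [hq] at h
          have hc : c = '0' := by injection h
          exact ih (n / 10) (by omega) (by omega) t (by rw [hq, hc])

theorem toDigits_inj (m : Nat) : ∀ n : Nat, Nat.toDigits 10 m = Nat.toDigits 10 n → m = n := by
  induction m using Nat.strong_induction_on with
  | _ m ih =>
    intro n h
    rw [Nat.toDigits_eq_if (n := m) (by norm_num), Nat.toDigits_eq_if (n := n) (by norm_num)] at h
    by_cases hm : m < 10 <;> by_cases hn : n < 10
    · simp only [if_pos hm, if_pos hn] at h
      exact digitChar_inj m n hm hn (by injection h)
    · simp only [if_pos hm, if_neg hn] at h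
      have hlen := congrArg List.length h
      rw [List.length_append] at hlen
      simp only [List.length_cons, List.length_nil] at hlen
      have hp := @Nat.length_toDigits_pos 10 (n / 10)
      omega
    · simp only [if_neg hm, if_pos hn] at h
      have hlen := congrArg List.length h
      rw [List.length_append] at hlen
      simp only [List.length_cons, List.length_nil] at hlen
      have hp := @Nat.length_toDigits_pos 10 (m / 10)
      omega
    · simp only [if_neg hm, if_neg hn] at h
      obtain ⟨h1, h2⟩ := List.append_inj' h (by simp)
      have hq : m / 10 = n / 10 := ih (m / 10) (by omega) (n / 10) h1
      have hr : m % 10 = n % 10 :=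
        digitChar_inj _ _ (Nat.mod_lt _ (by norm_num)) (Nat.mod_lt _ (by norm_num)) (by injection h2)
      omega

-- zero-padding str(n) to width 3 is still injective
theorem pad_inj_le (m n : Nat)
    (hle : (Nat.toDigits 10 m).length ≤ (Nat.toDigits 10 n).length)
    (h : List.replicate (3 - (Nat.toDigits 10 m).length) '0' ++ Nat.toDigits 10 m
       = List.replicate (3 - (Nat.toDigits 10 n).length) '0' ++ Nat.toDigits 10 n) : m = n := by
  set a := (Nat.toDigits 10 m).length with ha
  set b := (Nat.toDigits 10 n).length with hb
  have hsplit : List.replicate (3 - a) '0'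
      = List.replicate (3 - b) '0' ++ List.replicate ((3 - a) - (3 - b)) '0' := by
    rw [← List.replicate_add]
    congr 1
    omega
  rw [hsplit, List.append_assoc] at h
  have h2 := List.append_cancel_left h
  by_cases hc : (3 - a) - (3 - b) = 0
  · rw [hc] at h2
    simp at h2
    exact toDigits_inj m n h2
  · -- n's digit string would begin with '0', so n = 0 and its digits are ['0'] — impossible
    have hz : ∃ l, Nat.toDigits 10 n = '0' :: l := by
      cases hrep : List.replicate ((3 - a) - (3 - b)) '0' with
      | nil => exact absurd hrep (by simp [hc])
      | cons c t =>
          have hc0 : c = '0' := by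
            have := List.mem_replicate.mp (hrep ▸ List.mem_cons_self)
            exact this.2
          exact ⟨t ++ Nat.toDigits 10 m, by rw [← h2, hrep, hc0]; simp⟩
    obtain ⟨l, hl⟩ := hz
    rcases Nat.eq_zero_or_pos n with hn0 | hn0
    · subst hn0
      rw [Nat.toDigits_zero] at hl
      have : l = [] := by injection hl with h1 h2; exact h2.symm
      subst this
      -- then b = 1 while a < b and a ≥ 1: contradiction
      have hb1 : b = 1 := by rw [hb, Nat.toDigits_zero]; rfl
      have hap := @Nat.length_toDigits_pos 10 m
      omega
    · exact absurd hl (toDigits_ne_zero_cons n hn0 l)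

theorem pyFmt_inj (i j : Int) (hi : 0 ≤ i) (hj : 0 ≤ j) (h : pyFmt i = pyFmt j) : i = j := by
  simp only [pyFmt] at h
  have h1 : ("segment".toList ++ (List.replicate (3 - (PySem.Int.toChars i).length) '0' ++ (PySem.Int.toChars i ++ ".ts".toList)))
      = ("segment".toList ++ (List.replicate (3 - (PySem.Int.toChars j).length) '0' ++ (PySem.Int.toChars j ++ ".ts".toList))) := by
    have := congrArg String.toList h
    simpa using this
  have h2 := List.append_cancel_left h1
  rw [← List.append_assoc, ← List.append_assoc] at h2
  have h3 := (List.append_inj h2 (by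
    have := congrArg List.length h2
    simp at this ⊢
    omega)).1
  have hti : PySem.Int.toChars i = Nat.toDigits 10 i.toNat := by
    simp [PySem.Int.toChars, not_lt.mpr hi]
  have htj : PySem.Int.toChars j = Nat.toDigits 10 j.toNat := by
    simp [PySem.Int.toChars, not_lt.mpr hj]
  rw [hti, htj] at h3
  rcases le_total (Nat.toDigits 10 i.toNat).length (Nat.toDigits 10 j.toNat).length with hle | hle
  · have := pad_inj_le i.toNat j.toNat hle h3; omega
  · have := pad_inj_le j.toNat i.toNat hle h3.symm; omega

-- ---------- the rank of an index is its position in pvOrder ----------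

theorem pvOrder_mem_nonneg (segments : List String) (x : Int) (hx : x ∈ pvOrder segments) :
    0 ≤ x ∧ x < (segments.length : Int) := by
  unfold pvOrder at hx
  rw [PySem.List.mem_sorted, PySem.List.mem_pyRange_one] at hx
  simpa [PySem.List.len] using hx

theorem pvOrder_pairwise_lt (segments : List String) :
    (pvOrder segments).Pairwise (fun a b => pyFmt a < pyFmt b) := by
  have hle : (pvOrder segments).Pairwise (fun a b => pyFmt a ≤ pyFmt b) :=
    PySem.List.sorted_pairwise _ _
  have hnd : (pvOrder segments).Pairwise (fun a b : Int => a ≠ b) := pvOrder_nodup segments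
  have hcomb := List.Pairwise.and hle hnd
  refine List.Pairwise.imp_of_mem ?_ hcomb
  intro a b ha hb hab
  rcases hab with ⟨h1, h2⟩
  refine lt_of_le_of_ne h1 ?_
  intro he
  exact h2 (pyFmt_inj a b (pvOrder_mem_nonneg segments a ha).1 (pvOrder_mem_nonneg segments b hb).1 he)

-- in a strictly key-increasing list, the count of smaller keys is the position
theorem countP_lt_getElem :
    ∀ (s : List Int), s.Pairwise (fun a b => pyFmt a < pyFmt b) →
      ∀ (k : Nat) (hk : k < s.length),
        s.countP (fun x => decide (pyFmt x < pyFmt s[k])) = k := by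
  intro s
  induction s with
  | nil => intro _ k hk; simp at hk
  | cons a t ih =>
      intro hp k hk
      have hhead : ∀ x ∈ t, pyFmt a < pyFmt x := fun x hx => (List.pairwise_cons.mp hp).1 x hx
      have htail := (List.pairwise_cons.mp hp).2
      cases k with
      | zero =>
          simp only [List.getElem_cons_zero]
          rw [List.countP_cons_of_neg (by simp)]
          rw [List.countP_eq_zero]
          intro x hx
          simp only [decide_eq_true_eq]
          exact not_lt.mpr (le_of_lt (hhead x hx))
      | succ k =>
          simp only [List.getElem_cons_succ]
          have hk' : k < t.length := by simpa using hk
          rw [List.countP_cons_of_pos (by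
            simp only [decide_eq_true_eq]
            exact hhead t[k] (List.getElem_mem hk'))]
          exact congrArg (fun x => x + 1) (ih htail k hk')

-- ---------- the scatter loop with injective positions ----------

theorem foldl_set_miss {α β : Type} (R : β → Nat) (f : β → Option α) :
    ∀ (is : List β) (init : List (Option α)) (k : Nat), (∀ j ∈ is, R j ≠ k) →
      (is.foldl (fun acc j => acc.set (R j) (f j)) init)[k]? = init[k]? := by
  intro is
  induction is with
  | nil => intro init k _; rfl
  | cons j t ih =>
      intro init k h
      rw [List.foldl_cons, ih _ _ (fun x hx => h x (List.mem_cons_of_mem j hx)),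
          List.getElem?_set_ne (h j List.mem_cons_self)]

theorem foldl_set_length {α β : Type} (R : β → Nat) (f : β → Option α) :
    ∀ (is : List β) (init : List (Option α)),
      (is.foldl (fun acc j => acc.set (R j) (f j)) init).length = init.length := by
  intro is
  induction is with
  | nil => intro init; rfl
  | cons j t ih => intro init; rw [List.foldl_cons, ih]; exact List.length_set

theorem foldl_set_hit {α β : Type} (R : β → Nat) (f : β → Option α)
    (l1 l2 : List β) (j : β) (init : List (Option α)) (k : Nat)
    (hRj : R j = k) (hk : k < init.length) (hmiss : ∀ j' ∈ l2, R j' ≠ k) :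
    ((l1 ++ j :: l2).foldl (fun acc j => acc.set (R j) (f j)) init)[k]? = some (f j) := by
  rw [List.foldl_append, List.foldl_cons, foldl_set_miss R f l2 _ k hmiss, hRj,
      List.getElem?_set_self (by rw [foldl_set_length]; omega)]

-- ---------- B-side: B computes pvGather ----------

theorem enum_range_nat : ∀ N : Nat, PySem.List.enumerate (List.range N) 0
    = (List.range N).map (fun k : Nat => (((k : Nat) : Int), k)) := by
  intro N
  induction N with
  | zero => rfl
  | succ N ih =>
      rw [List.range_succ, PySem.List.enumerate_append, ih, List.map_append]
      congr 1
      rw [PySem.List.enumerate_cons, PySem.List.enumerate_nil]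
      simp [List.length_range]

theorem alt_eq_gather (segments : List String) :
    unfix_segments_alt segments = pvGather segments := by
  have hlen : PySem.List.len segments = ((segments.length : Nat) : Int) := by
    simp [PySem.List.len]
  simp only [unfix_segments_alt, hlen, PySem.List.pyRange_zero_natCast]
  set N := segments.length with hN
  set keys := (List.map (fun k => ((k : Nat) : Int)) (List.range N)).map pyFmt with hkeys
  -- the loop is a scatter over List.range N at position R k
  set R : Nat → Nat := fun k => keys.countP (fun x => decide (x < pyFmt ((k : Nat) : Int))) with hR
  set f : Nat → Option String := fun k => some (PySem.List.pyGetD segments ((k : Nat) : Int) "") with hf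
  have hloop :
      (PySem.List.enumerate keys 0).foldl
        (fun acc p => PySem.List.pySetD acc ((keys.countP (fun x => decide (x < p.2)) : Nat) : Int)
          (some (PySem.List.pyGetD segments p.1 ""))) (List.replicate N (none : Option String))
      = (List.range N).foldl (fun acc k => acc.set (R k) (f k))
          (List.replicate N (none : Option String)) := by
    rw [hkeys, List.map_map, enumerate_map (pyFmt ∘ fun k => ((k : Nat) : Int)) (List.range N) 0,
        enum_range_nat N, List.map_map, List.foldl_map]
    apply PySem.List.foldl_congr_mem
    intro acc k hk
    simp only [Function.comp, PySem.List.pySetD_natCast, hR, hf, hkeys, List.map_map]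
    rfl
  rw [hloop]
  -- identify the scattered list position by position with pvGather
  have hordlen : (pvOrder segments).length = N := pvOrder_length segments
  have hperm : (pvOrder segments).Perm (List.map (fun k => ((k : Nat) : Int)) (List.range N)) := by
    unfold pvOrder
    rw [hlen, PySem.List.pyRange_zero_natCast]
    exact PySem.List.sorted_perm _ _ _
  have hrank : ∀ (k : Nat) (hk : k < N),
      (pvOrder segments).countP (fun x => decide (pyFmt x < pyFmt ((pvOrder segments)[k]'(by omega)))) = k :=
    fun k hk => countP_lt_getElem (pvOrder segments) (pvOrder_pairwise_lt segments) k (by omega)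
  have hRval : ∀ (k : Nat) (hk : k < N),
      R ((pvOrder segments)[k]'(by omega)).toNat = k := by
    intro k hk
    have hnn := pvOrder_mem_nonneg segments _ (List.getElem_mem (by omega :
      k < (pvOrder segments).length))
    have hcast : ((((pvOrder segments)[k]'(by omega)).toNat : Nat) : Int)
        = (pvOrder segments)[k]'(by omega) := Int.toNat_of_nonneg hnn.1
    show List.countP
        (fun x => decide (x < pyFmt (((((pvOrder segments)[k]'(by omega)).toNat : Nat) : Int)))) keys = k
    rw [hcast, hkeys, List.countP_map, ← List.Perm.countP_eq _ hperm]
    simpa [Function.comp] using hrank k hk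
  -- every target position k < N is hit exactly by j = (pvOrder[k]).toNat
  have hgetElem : ∀ (k : Nat) (hk : k < N),
      ((List.range N).foldl (fun acc j => acc.set (R j) (f j))
          (List.replicate N (none : Option String)))[k]?
        = some (f ((pvOrder segments)[k]'(by omega)).toNat) := by
    intro k hk
    set j := ((pvOrder segments)[k]'(by omega)).toNat with hj
    have hjlt : j < N := by
      have hnn := pvOrder_mem_nonneg segments _ (List.getElem_mem (by omega :
        k < (pvOrder segments).length))
      omega
    obtain ⟨l1, l2, hsplit⟩ := List.append_of_mem (List.mem_range.mpr hjlt)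
    have hnd : (l1 ++ j :: l2).Nodup := hsplit ▸ List.nodup_range
    have hmiss : ∀ j' ∈ l2, R j' ≠ k := by
      intro j' hj' hRj'
      have hj'mem : j' ∈ List.range N := hsplit ▸ (by simp [List.mem_append, hj'])
      have hj'lt : j' < N := List.mem_range.mp hj'mem
      -- (j' : Int) is in pvOrder at some position k1 with R j' = k1
      have hmemord : ((j' : Nat) : Int) ∈ pvOrder segments :=
        hperm.mem_iff.mpr (List.mem_map_of_mem hj'mem)
      obtain ⟨k1, hk1, hk1e⟩ := List.mem_iff_getElem.mp hmemord
      have hRj1 : R j' = k1 := by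
        have := hRval k1 (by omega)
        rw [hk1e] at this
        simpa using this
      have hkk : k1 = k := by omega
      -- then pvOrder[k1] = pvOrder[k] gives j' = j, but j ∉ l2
      have hjj : ((j' : Nat) : Int) = (pvOrder segments)[k]'(by omega) := by
        subst hkk
        exact hk1e.symm
      have : j' = j := by omega
      subst this
      exact (List.nodup_cons.mp hnd.of_append_right).1 hj'
    rw [hsplit]
    exact foldl_set_hit R f l1 l2 j _ k (hRval k hk) (by simp [hk]) hmiss
  -- assemble: map getD "" of the scattered list is pvGather
  apply List.ext_getElem?
  intro k
  by_cases hk : k < N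
  · rw [List.getElem?_map, hgetElem k hk]
    have hg : (pvGather segments)[k]? = some (PySem.List.pyGetD segments ((pvOrder segments)[k]'(by omega)) "") := by
      unfold pvGather
      rw [List.getElem?_map, List.getElem?_eq_getElem (by omega)]
      rfl
    rw [hg, hf]
    have hnn := pvOrder_mem_nonneg segments _ (List.getElem_mem (by omega :
      k < (pvOrder segments).length))
    simp [Int.toNat_of_nonneg hnn.1]
  · have h1 : ((List.range N).foldl (fun acc j => acc.set (R j) (f j))
        (List.replicate N (none : Option String))).length = N := by
      rw [foldl_set_length]; simp
    rw [List.getElem?_eq_none (by simp [h1]; omega), List.getElem?_eq_none (by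
      unfold pvGather; simp [hordlen]; omega)]

-- ===== VERDICT (by name: the statement is the Claim_ definition above) =====
theorem unfix_segments_spec : Claim_equal_unfix_segments := by
  intro segments _
  unfold Spec_unfix_segments
  rw [unfix_eq_gather, alt_eq_gather]
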